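-- pv_equiv track=rewrite | github.com/RabbitRu/scene_detection | checkResults.py | _findOverlappings
-- ===== SOURCE A (Python) =====
-- def _findOverlappings(division, shotStart, shotEnd):
-- 	leftOverlap = 0
-- 	rightOverlap = 0
-- 	for i in range(1, len(division)):
-- 		if(shotStart < division[i - 1] and division[i - 1] < shotEnd):
-- 			leftOverlap = division[i - 1] - shotStart
-- 		if(shotStart < division[i] and division[i] < shotEnd):
-- 			rightOverlap = division[i] - shotStart
-- 	# здесь можно добавить замер времени
-- 	totalOverlap = leftOverlap + rightOverlap
-- 	return totalOverlap
-- ===== SOURCE B (Python) =====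
-- def _findOverlappings(division, shotStart, shotEnd):
--     def lastInside(values):
--         # first hit scanning from the back == last hit of a forward scan
--         for v in reversed(values):
--             if shotStart < v < shotEnd:
--                 return v - shotStart
--         return 0
--     return lastInside(division[:-1]) + lastInside(division[1:])
-- ===== Notes on version B (the rewrite author's own statement) =====
-- stated objective: alternative
-- what changed: Replaces A's forward index loop that keeps overwriting two accumulators with two backward scans that return at the first element strictly inside (shotStart, shotEnd), over division[:-1] and division[1:].
import Mathlib
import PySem

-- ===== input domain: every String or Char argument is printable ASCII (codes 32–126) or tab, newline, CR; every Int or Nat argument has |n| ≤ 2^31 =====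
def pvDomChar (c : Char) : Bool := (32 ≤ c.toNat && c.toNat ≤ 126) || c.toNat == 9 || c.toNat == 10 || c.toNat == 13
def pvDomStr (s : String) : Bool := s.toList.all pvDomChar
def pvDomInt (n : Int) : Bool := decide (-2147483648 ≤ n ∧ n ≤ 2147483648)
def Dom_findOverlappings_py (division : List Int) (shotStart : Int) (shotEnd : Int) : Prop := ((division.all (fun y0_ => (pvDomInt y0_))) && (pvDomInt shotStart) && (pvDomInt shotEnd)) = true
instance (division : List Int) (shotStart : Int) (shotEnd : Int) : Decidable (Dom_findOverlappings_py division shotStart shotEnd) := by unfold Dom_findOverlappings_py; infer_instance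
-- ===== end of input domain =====

-- B replaces A's forward index loop (two overwritten accumulators) by two backward
-- first-match scans over division[:-1] and division[1:]; same values, different traversal.

-- ===== PORT A =====
-- forward loop: for i in range(1, len(division)), overwriting leftOverlap/rightOverlap
def findOverlappings_py (division : List Int) (shotStart : Int) (shotEnd : Int) : Int :=
  let r := (PySem.List.pyRange 1 (division.length : Int) 1).foldl
    (fun (acc : Int × Int) i =>
      ( if shotStart < PySem.List.pyGetD division (i - 1) 0 ∧
            PySem.List.pyGetD division (i - 1) 0 < shotEnd
          then PySem.List.pyGetD division (i - 1) 0 - shotStart else acc.1,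
        if shotStart < PySem.List.pyGetD division i 0 ∧
            PySem.List.pyGetD division i 0 < shotEnd
          then PySem.List.pyGetD division i 0 - shotStart else acc.2 ))
    (0, 0)
  r.1 + r.2

-- ===== PORT B =====
-- lastInside: first element strictly inside (shotStart, shotEnd) scanning from the back
def pvLastInside (shotStart shotEnd : Int) (values : List Int) : Int :=
  match values.reverse.find? (fun v => decide (shotStart < v ∧ v < shotEnd)) with
  | some v => v - shotStart
  | none => 0

def findOverlappings_py_alt (division : List Int) (shotStart : Int) (shotEnd : Int) : Int :=
  pvLastInside shotStart shotEnd (PySem.List.slice division none (some (-1))) +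
  pvLastInside shotStart shotEnd (PySem.List.slice division (some 1) none)

-- ===== PRECONDITION & SPEC =====
def Spec_findOverlappings_py (division : List Int) (shotStart : Int) (shotEnd : Int) (out : Int) : Prop := out = findOverlappings_py_alt division shotStart shotEnd
instance (division : List Int) (shotStart : Int) (shotEnd : Int) (out : Int) : Decidable (Spec_findOverlappings_py division shotStart shotEnd out) := by unfold Spec_findOverlappings_py; infer_instance

-- ===== CLAIM (what is proved, stated in full; the proofs are below) =====
def Claim_equal_findOverlappings_py : Prop := ∀ (division : List Int) (shotStart : Int) (shotEnd : Int), Dom_findOverlappings_py division shotStart shotEnd → Spec_findOverlappings_py division shotStart shotEnd (findOverlappings_py division shotStart shotEnd)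

-- ===== LEMMAS AND PROOFS =====

-- an overwrite fold equals the first match of the reversed list
theorem pvPickD (s e : Int) (l : List Int) : ∀ (a : Int),
    l.foldl (fun acc v => if s < v ∧ v < e then v - s else acc) a
      = (match l.reverse.find? (fun v => decide (s < v ∧ v < e)) with
         | some v => v - s
         | none => a) := by
  induction l with
  | nil => intro a; rfl
  | cons v t ih =>
    intro a
    rw [List.foldl_cons, ih, List.reverse_cons, List.find?_append]
    rcases hf : t.reverse.find? (fun v => decide (s < v ∧ v < e)) with _ | w
    · by_cases h : s < v ∧ v < e <;> simp [h]
    · simp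

-- fold over List.range (length) reading getD equals fold over the list
theorem pvFoldRangeGetD (f : Int → Int → Int) (xs : List Int) (a : Int) :
    (List.range xs.length).foldl (fun acc k => f acc (xs.getD k 0)) a = xs.foldl f a := by
  have h0 : ((0 : Int) ≤ 0) := le_refl 0
  have := PySem.List.foldl_pyRange_zero_pyGetD (xs := xs) (d := 0) (f := f) (init := a)
  rw [← this, PySem.List.pyRange_one, List.foldl_map]
  simp

theorem findOverlappings_py_eq (division : List Int) (shotStart shotEnd : Int) :
    findOverlappings_py division shotStart shotEnd
      = findOverlappings_py_alt division shotStart shotEnd := by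
  unfold findOverlappings_py findOverlappings_py_alt pvLastInside
  rw [PySem.List.foldl_prod_mk
      (f := fun acc v => if shotStart < PySem.List.pyGetD division (v - 1) 0 ∧
              PySem.List.pyGetD division (v - 1) 0 < shotEnd
            then PySem.List.pyGetD division (v - 1) 0 - shotStart else acc)
      (g := fun acc v => if shotStart < PySem.List.pyGetD division v 0 ∧
              PySem.List.pyGetD division v 0 < shotEnd
            then PySem.List.pyGetD division v 0 - shotStart else acc)]
  -- right accumulator: fold over division.tail
  rw [PySem.List.foldl_pyRange_pyGetD' (a := 1) (xs := division) (d := 0)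
      (f := fun acc v => if shotStart < v ∧ v < shotEnd then v - shotStart else acc)
      (init := (0 : Int)) (by omega)]
  -- left accumulator: reindex i ↦ i - 1, then fold over division.dropLast
  have hleft : (PySem.List.pyRange 1 (division.length : Int) 1).foldl
      (fun acc v => if shotStart < PySem.List.pyGetD division (v - 1) 0 ∧
              PySem.List.pyGetD division (v - 1) 0 < shotEnd
            then PySem.List.pyGetD division (v - 1) 0 - shotStart else acc) 0
      = division.dropLast.foldl
          (fun acc v => if shotStart < v ∧ v < shotEnd then v - shotStart else acc) 0 := by
    rw [PySem.List.pyRange_one, List.foldl_map]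
    have hm : ((division.length : Int) - 1).toNat = division.dropLast.length := by
      rw [List.length_dropLast]; omega
    rw [hm, ← pvFoldRangeGetD
        (f := fun acc v => if shotStart < v ∧ v < shotEnd then v - shotStart else acc)
        (xs := division.dropLast)]
    apply PySem.List.foldl_congr_mem
    intro acc k hk
    have hk' : k < division.dropLast.length := List.mem_range.mp hk
    have hkd : (1 : Int) + (k : Int) - 1 = (k : Int) := by omega
    rw [hkd, PySem.List.pyGetD_natCast]
    have hlt : k < division.length := by
      rw [List.length_dropLast] at hk'; omega
    rw [List.getD_eq_getElem _ _ hlt, List.getD_eq_getElem _ _ hk', List.getElem_dropLast]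
  rw [hleft]
  rw [PySem.List.slice_to_neg_one, PySem.List.slice_from_one]
  rw [pvPickD, pvPickD]
  simp [List.drop_one]

-- ===== VERDICT (by name: the statement is the Claim_ definition above) =====
theorem findOverlappings_py_spec : Claim_equal_findOverlappings_py := by
  intro division shotStart shotEnd _
  exact findOverlappings_py_eq division shotStart shotEnd
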